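-- pv_equiv track=rewrite | github.com/faulknerpearce/advent_of_code | 2015/day_5/day_five.py | check_for_naughty_strings
-- ===== SOURCE A (Python) =====
-- def check_for_naughty_strings(my_line):
--     naughty = ['ab', 'cd', 'pq', 'xy']
--     last_char = ''
--     for letter in my_line:
--         combined = last_char + letter
--         if combined in naughty:
--             return False
--         else:
--             last_char = letter
--     return True
-- ===== SOURCE B (Python) =====
-- def check_for_naughty_strings(my_line):
--     return not any(bad in my_line for bad in ['ab', 'cd', 'pq', 'xy'])
-- ===== Notes on version B (the rewrite author's own statement) =====
-- stated objective: idiomatic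
-- what changed: B drops A's per-character scan with a last_char accumulator and instead tests each of the four forbidden two-character patterns for substring membership inside a single not any(...) expression, moving the per-character work into the C-level substring search.
import Mathlib
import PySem

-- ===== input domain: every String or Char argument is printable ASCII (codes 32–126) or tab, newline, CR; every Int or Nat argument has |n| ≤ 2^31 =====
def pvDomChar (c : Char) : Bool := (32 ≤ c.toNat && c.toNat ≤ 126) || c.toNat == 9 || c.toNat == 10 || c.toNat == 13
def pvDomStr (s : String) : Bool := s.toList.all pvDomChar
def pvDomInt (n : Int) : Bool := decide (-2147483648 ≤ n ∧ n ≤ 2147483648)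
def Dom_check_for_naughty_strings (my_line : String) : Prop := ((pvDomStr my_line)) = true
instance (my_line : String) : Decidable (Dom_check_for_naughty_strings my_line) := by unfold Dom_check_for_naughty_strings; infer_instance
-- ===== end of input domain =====

-- B replaces A's per-character scan with a last_char accumulator by an idiomatic
-- `not any(bad in my_line ...)` substring test over the four forbidden pairs.

-- ===== PORT A =====
-- naughty = ['ab', 'cd', 'pq', 'xy']  (the two-char strings ported as List Char)
def pvNaughtyA : List (List Char) := [['a','b'], ['c','d'], ['p','q'], ['x','y']]

-- the for-loop over my_line with state last_char (early `return False`)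
def pvLoopA : List Char → List Char → Bool
  | _, [] => true
  | last_char, letter :: rest =>
    let combined := last_char ++ [letter]
    if combined ∈ pvNaughtyA then false else pvLoopA [letter] rest

def check_for_naughty_strings (my_line : String) : Bool :=
  pvLoopA [] my_line.toList

-- ===== PORT B =====
def check_for_naughty_strings_alt (my_line : String) : Bool :=
  !(["ab", "cd", "pq", "xy"].any (fun bad => PySem.Str.isIn bad my_line))

-- ===== PRECONDITION & SPEC =====
def Spec_check_for_naughty_strings (my_line : String) (out : Bool) : Prop := out = check_for_naughty_strings_alt my_line
instance (my_line : String) (out : Bool) : Decidable (Spec_check_for_naughty_strings my_line out) := by unfold Spec_check_for_naughty_strings; infer_instance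

-- ===== CLAIM (what is proved, stated in full; the proofs are below) =====
def Claim_equal_check_for_naughty_strings : Prop := ∀ (my_line : String), Dom_check_for_naughty_strings my_line → Spec_check_for_naughty_strings my_line (check_for_naughty_strings my_line)

-- ===== LEMMAS AND PROOFS =====

-- a two-character pattern is never an infix of a singleton list
theorem pv_two_not_infix_short (a b x : Char) (h : [a, b] <:+: [x]) : False := by
  have := h.length_le
  simp at this

-- one step of the infix relation for a two-character pattern
theorem pv_two_infix_cons (a b x : Char) (xs : List Char) :
    ([a, b] <:+: x :: xs) ↔ (a = x ∧ ∃ t, xs = b :: t) ∨ [a, b] <:+: xs := by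
  rw [List.infix_cons_iff, List.cons_prefix_cons]
  constructor
  · rintro (⟨ha, t, ht⟩ | hi)
    · exact Or.inl ⟨ha, t, ht.symm⟩
    · exact Or.inr hi
  · rintro (⟨ha, t, ht⟩ | hi)
    · exact Or.inl ⟨ha, t, ht.symm⟩
    · exact Or.inr hi

-- main invariant: the loop with last_char = [last] detects exactly a forbidden infix of last :: cs
theorem pv_loop_char (cs : List Char) : ∀ last : Char,
    pvLoopA [last] cs = !decide (∃ p ∈ pvNaughtyA, p <:+: last :: cs) := by
  induction cs with
  | nil =>
    intro last
    have hno : ¬ ∃ p ∈ pvNaughtyA, p <:+: [last] := by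
      rintro ⟨p, hp, hinf⟩
      fin_cases hp <;> exact pv_two_not_infix_short _ _ _ hinf
    simp [pvLoopA, decide_eq_false hno]
  | cons c rest ih =>
    intro last
    simp only [pvLoopA, List.singleton_append]
    by_cases hmem : [last, c] ∈ pvNaughtyA
    · have hex : ∃ p ∈ pvNaughtyA, p <:+: last :: c :: rest :=
        ⟨[last, c], hmem, List.IsPrefix.isInfix ⟨rest, rfl⟩⟩
      simp [hmem, hex]
    · have hiff : (∃ p ∈ pvNaughtyA, p <:+: last :: c :: rest) ↔
          (∃ p ∈ pvNaughtyA, p <:+: c :: rest) := by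
        constructor
        · rintro ⟨p, hp, hinf⟩
          have hp2 : ∃ a b, p = [a, b] := by
            fin_cases hp <;> exact ⟨_, _, rfl⟩
          obtain ⟨a, b, rfl⟩ := hp2
          rcases (pv_two_infix_cons a b last (c :: rest)).1 hinf with ⟨ha, t, ht⟩ | hi
          · exfalso
            subst ha
            injection ht with hb _
            subst hb
            exact hmem hp
          · exact ⟨[a, b], hp, hi⟩
        · rintro ⟨p, hp, hinf⟩
          exact ⟨p, hp, hinf.trans (List.suffix_cons last (c :: rest)).isInfix⟩
      rw [if_neg hmem, ih c, decide_eq_decide.2 hiff]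

-- B's port computes the same "some forbidden pair is an infix" test
theorem pv_alt_eq (s : String) :
    check_for_naughty_strings_alt s = !decide (∃ p ∈ pvNaughtyA, p <:+: s.toList) := by
  have h : ∀ sub : String, PySem.Str.isIn sub s = decide (sub.toList <:+: s.toList) := by
    intro sub
    by_cases hs : sub.toList <:+: s.toList
    · rw [(PySem.Str.isIn_iff_infix sub s).2 hs]; simp [hs]
    · rw [Bool.eq_false_iff.2 (mt (PySem.Str.isIn_iff_infix sub s).1 hs)]; simp [hs]
  simp only [check_for_naughty_strings_alt, List.any_cons, List.any_nil, h, Bool.or_false]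
  have hab : "ab".toList = ['a','b'] := rfl
  have hcd : "cd".toList = ['c','d'] := rfl
  have hpq : "pq".toList = ['p','q'] := rfl
  have hxy : "xy".toList = ['x','y'] := rfl
  rw [hab, hcd, hpq, hxy]
  simp only [← Bool.decide_or]
  congr 1
  rw [decide_eq_decide]
  simp only [pvNaughtyA, List.mem_cons, List.not_mem_nil, or_false]
  constructor
  · rintro (h | h | h | h)
    · exact ⟨_, Or.inl rfl, h⟩
    · exact ⟨_, Or.inr (Or.inl rfl), h⟩
    · exact ⟨_, Or.inr (Or.inr (Or.inl rfl)), h⟩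
    · exact ⟨_, Or.inr (Or.inr (Or.inr rfl)), h⟩
  · rintro ⟨p, (rfl | rfl | rfl | rfl), h⟩
    · exact Or.inl h
    · exact Or.inr (Or.inl h)
    · exact Or.inr (Or.inr (Or.inl h))
    · exact Or.inr (Or.inr (Or.inr h))

-- ===== VERDICT (by name: the statement is the Claim_ definition above) =====
theorem check_for_naughty_strings_spec : Claim_equal_check_for_naughty_strings := by
  intro s _
  unfold Spec_check_for_naughty_strings
  rw [pv_alt_eq]
  unfold check_for_naughty_strings
  cases hs : s.toList with
  | nil =>
    simp [pvLoopA, pvNaughtyA]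
  | cons c rest =>
    have h1 : pvLoopA [] (c :: rest) = pvLoopA [c] rest := by
      simp [pvLoopA, pvNaughtyA]
    rw [h1, pv_loop_char]
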